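-- pv_equiv track=rewrite | github.com/wigm4n/TTS | text_processing/dictionary.py | text_num_split
-- ===== SOURCE A (Python) =====
-- def text_num_split(item):
--     before = ""
--     prev_digit = False
--     prev_space = False
--     for index, letter in enumerate(item, 0):
--         if letter.isdigit():
--             if prev_digit:
--                 before += letter
--             else:
--                 if not prev_space:
--                     before += " "
--                 before += letter
--                 prev_digit = True
--                 prev_space = False
--         else:
--             if letter == " ":
--                 if prev_space:
--                     continue
--                 prev_space = True
--                 prev_digit = False
--                 before += letter
--                 continue
--             if prev_digit:
--                 before += " " + letter
--                 prev_digit = False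
--                 prev_space = False
--                 continue
--             prev_digit = False
--             prev_space = False
--             before += letter
--     return before
-- ===== SOURCE B (Python) =====
-- import re
--
-- def text_num_split(item):
--     s = re.sub(r'(\d+)', r' \1', item)          # space before every maximal digit run
--     s = re.sub(r'(\d)([^\d ])', r'\1 \2', s)    # space after a digit run unless next is digit or literal space
--     s = re.sub(r'  +', ' ', s)                  # collapse runs of literal spaces
--     return s
-- ===== Notes on version B (the rewrite author's own statement) =====
-- stated objective: idiomatic
-- what changed: Replaced the char-by-char state machine with three regex substitutions: prefix every maximal digit run with a space, insert a space after a digit followed by a non-digit non-space, then collapse runs of literal spaces.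
import Mathlib
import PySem

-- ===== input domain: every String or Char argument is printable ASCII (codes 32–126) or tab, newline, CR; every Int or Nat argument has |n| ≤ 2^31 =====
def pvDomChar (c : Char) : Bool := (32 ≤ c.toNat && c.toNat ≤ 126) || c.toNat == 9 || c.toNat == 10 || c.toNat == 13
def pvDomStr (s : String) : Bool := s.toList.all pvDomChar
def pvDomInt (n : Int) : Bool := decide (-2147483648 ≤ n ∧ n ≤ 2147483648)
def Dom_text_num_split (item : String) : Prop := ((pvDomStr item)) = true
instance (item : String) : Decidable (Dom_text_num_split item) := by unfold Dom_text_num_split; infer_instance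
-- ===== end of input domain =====

-- B replaces A's char-by-char state machine by three regex substitutions (idiomatic); equal output on all Dom inputs.

-- ===== PORT A =====
-- A's for-loop over the string with state (before, prev_digit, prev_space); the
-- accumulator is kept as List Char (Python string append ↔ list append).
-- letter.isdigit() on a single ASCII char is exactly Char.isDigit (Dom is ASCII).
def pvLoopA : List Char → List Char → Bool → Bool → List Char
  | [], before, _, _ => before
  | c :: t, before, prev_digit, prev_space =>
    if c.isDigit then
      if prev_digit then pvLoopA t (before ++ [c]) prev_digit prev_space
      else
        if ¬ prev_space then pvLoopA t (before ++ [' ', c]) true false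
        else pvLoopA t (before ++ [c]) true false
    else
      if c = ' ' then
        if prev_space then pvLoopA t before prev_digit prev_space
        else pvLoopA t (before ++ [c]) false true
      else
        if prev_digit then pvLoopA t (before ++ [' ', c]) false false
        else pvLoopA t (before ++ [c]) false false

def text_num_split (item : String) : String :=
  String.ofList (pvLoopA item.toList [] false false)

-- ===== PORT B =====
-- Hand ports of Source B's three re.sub passes (PySem has no regex); each is exact on Dom:
-- re.sub(r'(\d+)', r' \1', s): prefix a space to every maximal digit run, i.e.
-- insert ' ' before a digit whose predecessor (tracked by the Bool) is not a digit.
def pvSub1 : List Char → Bool → List Char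
  | [], _ => []
  | c :: t, pd =>
    if c.isDigit && !pd then ' ' :: c :: pvSub1 t true
    else c :: pvSub1 t c.isDigit
-- re.sub(r'(\d)([^\d ])', r'\1 \2', s): matches are non-overlapping and the second
-- matched char can never be the first char of another match, so this equals the
-- left-context scan: insert ' ' after a digit followed by a non-digit non-space.
def pvSub2 : Bool → List Char → List Char
  | _, [] => []
  | pd, c :: t =>
    if pd && !c.isDigit && c ≠ ' ' then ' ' :: c :: pvSub2 c.isDigit t
    else c :: pvSub2 c.isDigit t
-- re.sub(r'  +', ' ', s): collapse each run of literal spaces to a single space,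
-- i.e. drop a space whose predecessor (the Bool) was a space.
def pvSub3 : Bool → List Char → List Char
  | _, [] => []
  | ps, c :: t =>
    if c = ' ' then (if ps then pvSub3 true t else ' ' :: pvSub3 true t)
    else c :: pvSub3 false t

def text_num_split_alt (item : String) : String :=
  String.ofList (pvSub3 false (pvSub2 false (pvSub1 item.toList false)))

-- ===== PRECONDITION & SPEC =====
def Spec_text_num_split (item : String) (out : String) : Prop := out = text_num_split_alt item
instance (item : String) (out : String) : Decidable (Spec_text_num_split item out) := by unfold Spec_text_num_split; infer_instance

-- ===== CLAIM (what is proved, stated in full; the proofs are below) =====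
def Claim_equal_text_num_split : Prop := ∀ (item : String), Dom_text_num_split item → Spec_text_num_split item (text_num_split item)

-- ===== LEMMAS AND PROOFS =====

theorem pv_digit_ne_space {c : Char} (h : c.isDigit = true) : c ≠ ' ' := by
  intro h'; subst h'; simp [Char.isDigit] at h

-- A's loop with state (pd, ps), ¬(pd ∧ ps) invariant, equals the three-pass pipeline.
theorem pv_main : ∀ (l : List Char) (b : List Char) (pd ps : Bool),
    (pd = true → ps = false) →
    pvLoopA l b pd ps = b ++ pvSub3 ps (pvSub2 pd (pvSub1 l pd)) := by
  intro l
  induction l with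
  | nil => intro b pd ps _; simp [pvLoopA, pvSub1, pvSub2, pvSub3]
  | cons c t ih =>
    intro b pd ps hinv
    by_cases hd : c.isDigit = true
    · have hne : c ≠ ' ' := pv_digit_ne_space hd
      cases pd with
      | true =>
        have hps : ps = false := hinv rfl
        subst hps
        simp [pvLoopA, pvSub1, pvSub2, pvSub3, hd, hne,
          ih (b ++ [c]) true false (fun _ => rfl)]
      | false =>
        cases ps with
        | true =>
          simp [pvLoopA, pvSub1, pvSub2, pvSub3, hd, hne,
            ih (b ++ [c]) true false (fun _ => rfl)]
        | false =>
          simp [pvLoopA, pvSub1, pvSub2, pvSub3, hd, hne,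
            ih (b ++ [' ', c]) true false (fun _ => rfl)]
    · by_cases hsp : c = ' '
      · subst hsp
        cases ps with
        | true =>
          have hpd : pd = false := by
            cases pd with
            | true => exact absurd (hinv rfl) (by simp)
            | false => rfl
          subst hpd
          simp [pvLoopA, pvSub1, pvSub2, pvSub3, hd,
            ih b false true (by simp)]
        | false =>
          cases pd with
          | true =>
            simp [pvLoopA, pvSub1, pvSub2, pvSub3, hd,
              ih (b ++ [' ']) false true (by simp)]
          | false =>
            simp [pvLoopA, pvSub1, pvSub2, pvSub3, hd,
              ih (b ++ [' ']) false true (by simp)]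
      · cases pd with
        | true =>
          have hps : ps = false := hinv rfl
          subst hps
          simp [pvLoopA, pvSub1, pvSub2, pvSub3, hd, hsp,
            ih (b ++ [' ', c]) false false (by simp)]
        | false =>
          cases ps with
          | true =>
            simp [pvLoopA, pvSub1, pvSub2, pvSub3, hd, hsp,
              ih (b ++ [c]) false false (by simp)]
          | false =>
            simp [pvLoopA, pvSub1, pvSub2, pvSub3, hd, hsp,
              ih (b ++ [c]) false false (by simp)]

-- ===== VERDICT (by name: the statement is the Claim_ definition above) =====
theorem text_num_split_spec : Claim_equal_text_num_split := by
  intro item _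
  unfold Spec_text_num_split text_num_split text_num_split_alt
  rw [pv_main item.toList [] false false (by simp)]
  simp
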